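-- pv_equiv track=rewrite | github.com/andis-roze/car-number-sums | main.py | check_all_digits_used_once
-- ===== SOURCE A (Python) =====
-- def check_all_digits_used_once(numbers, operands):
--     new_numbers = numbers
--
--     for op in operands:
--         for digit in op:
--             if len(new_numbers) > 0 and digit in new_numbers:
--                 new_numbers = new_numbers.replace(digit, "")
--             else:
--                 return False
--
--     return True and (len(new_numbers) == 0 or int(new_numbers) == 0)
-- ===== SOURCE B (Python) =====
-- def check_all_digits_used_once(numbers, operands):
--     used = "".join(operands)
--     used_set = set(used)
--     if len(used_set) != len(used) or not used_set.issubset(set(numbers)):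
--         return False
--     leftover = "".join(c for c in numbers if c not in used_set)
--     return len(leftover) == 0 or int(leftover) == 0
-- ===== Notes on version B (the rewrite author's own statement) =====
-- stated objective: alternative
-- what changed: B replaces A's nested consume-loop over a shrinking string by a closed-form characterisation: since A's replace deletes ALL copies of a consumed digit, the loop succeeds exactly when the concatenated operand characters are pairwise distinct and each occurs in numbers; B checks that with a duplicate test plus one subset test on sets built once, then filters numbers once for the leftover.
import Mathlib
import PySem

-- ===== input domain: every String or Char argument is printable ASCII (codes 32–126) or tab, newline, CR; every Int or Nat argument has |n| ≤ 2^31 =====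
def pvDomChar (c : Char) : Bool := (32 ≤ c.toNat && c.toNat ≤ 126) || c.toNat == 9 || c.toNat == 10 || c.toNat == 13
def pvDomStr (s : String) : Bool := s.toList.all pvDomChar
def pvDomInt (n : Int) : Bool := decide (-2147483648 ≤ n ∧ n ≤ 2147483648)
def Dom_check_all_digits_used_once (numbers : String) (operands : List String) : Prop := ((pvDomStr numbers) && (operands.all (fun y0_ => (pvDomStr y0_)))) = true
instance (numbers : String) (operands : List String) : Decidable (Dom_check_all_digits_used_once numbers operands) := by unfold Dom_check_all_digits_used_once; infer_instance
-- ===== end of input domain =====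

-- B replaces A's nested consume-loop over a shrinking string by a closed-form test: the
-- concatenated operand characters must be pairwise distinct and a subset of numbers'
-- characters; then one filter pass yields the leftover (objective: alternative).

-- ===== PORT A =====
-- inner loop: for digit in op
def pvAInner (ds : List Char) (nn : List Char) : Option (List Char) :=
  match ds with
  | [] => some nn
  | d :: ds' =>
    if (0 < PySem.Chars.len nn) && PySem.Chars.isIn [d] nn then
      pvAInner ds' (PySem.Chars.replace nn [d] [])
    else none   -- 'return False'

-- outer loop: for op in operands
def pvAOuter (ops : List String) (nn : List Char) : Option (List Char) :=
  match ops with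
  | [] => some nn
  | op :: rest =>
    match pvAInner op.toList nn with
    | none => none
    | some nn' => pvAOuter rest nn'

def check_all_digits_used_once (numbers : String) (operands : List String) : Bool :=
  match pvAOuter operands numbers.toList with
  | none => false
  | some nn =>
    (PySem.Chars.len nn == 0) ||
      (match PySem.Int.ofChars? nn with
       | some v => v == 0
       | none => false)   -- int(new_numbers) raises ValueError here; excluded by Pre_

-- ===== PORT B =====
def check_all_digits_used_once_alt (numbers : String) (operands : List String) : Bool :=
  let used := operands.flatMap String.toList            -- "".join(operands)
  let usedSet := PySem.Set.ofList used                  -- set(used)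
  if !(PySem.Set.len usedSet == PySem.Chars.len used) ||
     !(PySem.Set.issubset usedSet (PySem.Set.ofList numbers.toList)) then
    false
  else
    let leftover := numbers.toList.filter (fun c => !(PySem.Set.contains usedSet c))
    (PySem.Chars.len leftover == 0) ||
      (match PySem.Int.ofChars? leftover with
       | some v => v == 0
       | none => false)   -- int(leftover) raises ValueError here; excluded by Pre_

-- ===== PRECONDITION & SPEC =====
-- Pre_ excludes exactly the inputs on which the Python A raises ValueError: whenever the operand
-- characters are pairwise distinct and all occur in `numbers` (so the final int() call is reached),
-- the leftover characters of `numbers` must be empty or form a valid int literal.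
def Pre_check_all_digits_used_once (numbers : String) (operands : List String) : Prop :=
  (operands.flatMap String.toList).Nodup ∧
      (operands.flatMap String.toList).all (fun c => numbers.toList.contains c) = true →
    (numbers.toList.filter (fun c => !((operands.flatMap String.toList).contains c)) = [] ∨
     (PySem.Int.ofChars?
        (numbers.toList.filter (fun c => !((operands.flatMap String.toList).contains c)))).isSome = true)
instance (numbers : String) (operands : List String) : Decidable (Pre_check_all_digits_used_once numbers operands) := by unfold Pre_check_all_digits_used_once; infer_instance

def pvWitness_check_all_digits_used_once : String × List String := ("12", ["1", "2"])

def Spec_check_all_digits_used_once (numbers : String) (operands : List String) (out : Bool) : Prop := out = check_all_digits_used_once_alt numbers operands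
instance (numbers : String) (operands : List String) (out : Bool) : Decidable (Spec_check_all_digits_used_once numbers operands out) := by unfold Spec_check_all_digits_used_once; infer_instance

-- ===== CLAIM (what is proved, stated in full; the proofs are below) =====
def Claim_equal_check_all_digits_used_once : Prop := ∀ (numbers : String) (operands : List String), Dom_check_all_digits_used_once numbers operands → Pre_check_all_digits_used_once numbers operands → Spec_check_all_digits_used_once numbers operands (check_all_digits_used_once numbers operands)

-- ===== LEMMAS AND PROOFS =====

-- abstract consume loop over the concatenated operand characters
def pvConsume (ds : List Char) (nn : List Char) : Option (List Char) :=
  match ds with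
  | [] => some nn
  | d :: ds' =>
    if d ∈ nn then pvConsume ds' (nn.filter (· ≠ d)) else none

-- new_numbers.replace(digit, "") on a single-character pattern deletes every occurrence
theorem pv_replace_go_single (d : Char) : ∀ (fuel : Nat) (l acc : List Char),
    l.length ≤ fuel →
    PySem.Chars.replace.go [d] [] fuel l acc = acc.reverse ++ l.filter (· ≠ d) := by
  intro fuel
  induction fuel with
  | zero =>
    intro l acc h
    have hl : l = [] := List.length_eq_zero_iff.mp (Nat.le_zero.mp h)
    subst hl
    simp [PySem.Chars.replace.go]
  | succ n ih =>
    intro l acc h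
    cases l with
    | nil => simp [PySem.Chars.replace.go]
    | cons c t =>
      have ht : t.length ≤ n := Nat.lt_succ_iff.mp (by simpa using h)
      by_cases hcd : c = d
      · subst hcd
        have hpre : [c].isPrefixOf (c :: t) = true := by simp [List.isPrefixOf]
        have e1 : PySem.Chars.replace.go [c] [] (n + 1) (c :: t) acc =
            PySem.Chars.replace.go [c] [] n t acc := by
          simp [PySem.Chars.replace.go, hpre]
        rw [e1, ih t acc ht]
        simp
      · have hpre : [d].isPrefixOf (c :: t) = false := by
          simp [List.isPrefixOf]; exact fun h' => hcd h'.symm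
        have e2 : PySem.Chars.replace.go [d] [] (n + 1) (c :: t) acc =
            PySem.Chars.replace.go [d] [] n t (c :: acc) := by
          simp [PySem.Chars.replace.go, hpre]
        rw [e2, ih t (c :: acc) ht]
        simp [hcd]

theorem pv_replace_single (d : Char) (l : List Char) :
    PySem.Chars.replace l [d] [] = l.filter (· ≠ d) := by
  simp only [PySem.Chars.replace, List.isEmpty_cons, Bool.false_eq_true, if_false]
  simpa using pv_replace_go_single d l.length l [] le_rfl

-- 'digit in new_numbers' on a single character is list membership
theorem pv_isIn_single (d : Char) (l : List Char) :
    PySem.Chars.isIn [d] l = true ↔ d ∈ l := by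
  rw [PySem.Chars.isIn_iff_infix]
  constructor
  · intro h
    exact (List.singleton_sublist.mp h.sublist)
  · intro h
    obtain ⟨s, t, rfl⟩ := List.append_of_mem h
    exact ⟨s, t, by simp⟩

-- A's inner loop is the abstract consume loop
theorem pv_inner_eq_consume : ∀ (ds nn : List Char), pvAInner ds nn = pvConsume ds nn := by
  intro ds
  induction ds with
  | nil => intro nn; rfl
  | cons d ds' ih =>
    intro nn
    by_cases hd : d ∈ nn
    · have hisin : PySem.Chars.isIn [d] nn = true := (pv_isIn_single d nn).mpr hd
      have hlen : 0 < PySem.Chars.len nn := by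
        rw [PySem.Chars.len_eq]
        exact_mod_cast List.length_pos_iff.mpr (List.ne_nil_of_mem hd)
      show (if (0 < PySem.Chars.len nn) && PySem.Chars.isIn [d] nn then
            pvAInner ds' (PySem.Chars.replace nn [d] []) else none) = _
      rw [hisin, decide_eq_true hlen, Bool.true_and, if_pos rfl,
        pv_replace_single, ih]
      show _ = if d ∈ nn then pvConsume ds' (nn.filter (· ≠ d)) else none
      rw [if_pos hd]
    · have hisin : PySem.Chars.isIn [d] nn = false := by
        cases hii : PySem.Chars.isIn [d] nn with
        | false => rfl
        | true => exact absurd ((pv_isIn_single d nn).mp hii) hd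
      show (if (0 < PySem.Chars.len nn) && PySem.Chars.isIn [d] nn then
            pvAInner ds' (PySem.Chars.replace nn [d] []) else none) = _
      rw [hisin, Bool.and_false, if_neg Bool.false_ne_true]
      show _ = if d ∈ nn then pvConsume ds' (nn.filter (· ≠ d)) else none
      rw [if_neg hd]

theorem pv_consume_append (a b nn : List Char) :
    pvConsume (a ++ b) nn = (pvConsume a nn).bind (pvConsume b) := by
  induction a generalizing nn with
  | nil => rfl
  | cons d a' ih =>
    show (if d ∈ nn then pvConsume (a' ++ b) (nn.filter (· ≠ d)) else none) =
      (if d ∈ nn then pvConsume a' (nn.filter (· ≠ d)) else none).bind (pvConsume b)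
    by_cases hd : d ∈ nn
    · rw [if_pos hd, if_pos hd, ih]
    · rw [if_neg hd, if_neg hd]; rfl

-- A's outer loop over operands is the consume loop over the concatenation
theorem pv_outer_eq_consume : ∀ (ops : List String) (nn : List Char),
    pvAOuter ops nn = pvConsume (ops.flatMap String.toList) nn := by
  intro ops
  induction ops with
  | nil => intro nn; rfl
  | cons op rest ih =>
    intro nn
    show (match pvAInner op.toList nn with
          | none => none
          | some nn' => pvAOuter rest nn') = _
    rw [List.flatMap_cons, pv_consume_append]
    rw [pv_inner_eq_consume]
    cases pvConsume op.toList nn with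
    | none => rfl
    | some nn' => exact ih nn'

-- closed-form characterisation of the consume loop
theorem pv_consume_char : ∀ (ds nn : List Char),
    pvConsume ds nn =
      if ds.Nodup ∧ ∀ d ∈ ds, d ∈ nn then
        some (nn.filter (fun c => !ds.contains c))
      else none := by
  intro ds
  induction ds with
  | nil => intro nn; simp [pvConsume]
  | cons d ds' ih =>
    intro nn
    show (if d ∈ nn then pvConsume ds' (nn.filter (· ≠ d)) else none) = _
    by_cases hd : d ∈ nn
    · rw [if_pos hd, ih]
      by_cases hN : ds'.Nodup ∧ ∀ e ∈ ds', e ∈ nn.filter (· ≠ d)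
      · have hcond : (d :: ds').Nodup ∧ ∀ e ∈ d :: ds', e ∈ nn := by
          refine ⟨List.nodup_cons.mpr ⟨?_, hN.1⟩, ?_⟩
          · intro hdm
            have := List.mem_filter.mp (hN.2 d hdm)
            simp at this
          · intro e he
            rcases List.mem_cons.mp he with rfl | he'
            · exact hd
            · exact (List.mem_filter.mp (hN.2 e he')).1
        rw [if_pos hN, if_pos hcond]
        congr 1
        rw [List.filter_filter]
        refine List.filter_congr ?_
        intro c _
        rw [Bool.eq_iff_iff]
        simp only [Bool.and_eq_true, decide_eq_true_eq, Bool.not_eq_true',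
          List.contains_eq_mem, decide_eq_false_iff_not, List.mem_cons]
        constructor
        · rintro ⟨hcds, hcd⟩ (h | h)
          · exact hcd h
          · exact hcds h
        · intro h
          exact ⟨fun h' => h (Or.inr h'), fun h' => h (Or.inl h')⟩
      · have hcond : ¬((d :: ds').Nodup ∧ ∀ e ∈ d :: ds', e ∈ nn) := by
          rintro ⟨hnd, hmem⟩
          apply hN
          refine ⟨(List.nodup_cons.mp hnd).2, ?_⟩
          intro e he
          refine List.mem_filter.mpr ⟨hmem e (List.mem_cons_of_mem d he), ?_⟩
          simp only [decide_eq_true_eq]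
          intro h
          exact (List.nodup_cons.mp hnd).1 (h ▸ he)
        rw [if_neg hN, if_neg hcond]
    · rw [if_neg hd, if_neg]
      rintro ⟨_, hmem⟩
      exact hd (hmem d List.mem_cons_self)

-- |set(xs)| = |xs| iff xs has no duplicates
theorem pv_len_ofList_eq_iff (xs : List Char) :
    ((PySem.Set.ofList xs).length = xs.length) ↔ xs.Nodup := by
  constructor
  · intro h
    have hdl : xs.dedup.length = xs.length := by
      have h1 : (PySem.Set.ofList xs).toFinset = xs.toFinset := by
        ext c
        simp [PySem.Set.mem_ofList]
      have h2 : (PySem.Set.ofList xs).toFinset.card = (PySem.Set.ofList xs).length :=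
        List.toFinset_card_of_nodup (PySem.Set.nodup_ofList xs)
      have h3 : xs.toFinset.card = xs.dedup.length := List.card_toFinset xs
      have h1c : (PySem.Set.ofList xs).toFinset.card = xs.toFinset.card := by rw [h1]
      omega
    have := List.Sublist.eq_of_length (List.dedup_sublist xs) hdl
    exact List.dedup_eq_self.mp this
  · intro h
    rw [PySem.Set.ofList_eq_self_of_nodup xs h]

-- ===== VERDICT (by name: the statement is the Claim_ definition above) =====
theorem check_all_digits_used_once_spec : Claim_equal_check_all_digits_used_once := by
  intro numbers operands _dom _pre
  unfold Spec_check_all_digits_used_once check_all_digits_used_once check_all_digits_used_once_alt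
  rw [pv_outer_eq_consume, pv_consume_char]
  set flat := operands.flatMap String.toList with hflat
  set nn := numbers.toList with hnn
  by_cases hcond : flat.Nodup ∧ ∀ d ∈ flat, d ∈ nn
  · rw [if_pos hcond]
    have hlen : (PySem.Set.len (PySem.Set.ofList flat) == PySem.Chars.len flat) = true := by
      simp [PySem.Set.len, PySem.Chars.len_eq, PySem.Set.ofList_eq_self_of_nodup flat hcond.1]
    have hsub : PySem.Set.issubset (PySem.Set.ofList flat) (PySem.Set.ofList nn) = true := by
      rw [PySem.Set.issubset_iff]
      intro c hc
      exact (PySem.Set.mem_ofList nn c).mpr (hcond.2 c ((PySem.Set.mem_ofList flat c).mp hc))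
    simp only [hlen, hsub, Bool.not_true, Bool.or_self, Bool.false_eq_true, if_false]
    have hfe : nn.filter (fun c => !(PySem.Set.contains (PySem.Set.ofList flat) c)) =
        nn.filter (fun c => !flat.contains c) := by
      refine List.filter_congr ?_
      intro c _
      rw [Bool.eq_iff_iff]
      simp [PySem.Set.mem_ofList]
    rw [hfe]
  · rw [if_neg hcond]
    have : (!(PySem.Set.len (PySem.Set.ofList flat) == PySem.Chars.len flat) ||
        !(PySem.Set.issubset (PySem.Set.ofList flat) (PySem.Set.ofList nn))) = true := by
      by_cases hnd : flat.Nodup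
      · have hm : ¬ ∀ d ∈ flat, d ∈ nn := fun h => hcond ⟨hnd, h⟩
        push Not at hm
        obtain ⟨d, hdm, hdn⟩ := hm
        have : PySem.Set.issubset (PySem.Set.ofList flat) (PySem.Set.ofList nn) = false := by
          cases hs : PySem.Set.issubset (PySem.Set.ofList flat) (PySem.Set.ofList nn) with
          | false => rfl
          | true =>
            rw [PySem.Set.issubset_iff] at hs
            exact absurd ((PySem.Set.mem_ofList nn d).mp
              (hs d ((PySem.Set.mem_ofList flat d).mpr hdm))) hdn
        rw [this]
        simp
      · have : (PySem.Set.len (PySem.Set.ofList flat) == PySem.Chars.len flat) = false := by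
        -- lengths differ when flat has a duplicate
          rw [beq_eq_false_iff_ne]
          intro h
          apply hnd
          apply (pv_len_ofList_eq_iff flat).mp
          simp only [PySem.Set.len, PySem.Chars.len_eq] at h
          exact_mod_cast h
        rw [this]
        simp
    rw [if_pos (by simpa using this)]
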